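-- pv_equiv track=rewrite | github.com/design4music/sni-platform | etl_pipeline/clustering/clust1_taxonomy_graph.py | triad_seed_ok
-- ===== SOURCE A (Python) =====
-- def triad_seed_ok(article_tokens, hub_tokens, triad_pairs):
--     """Tiny helper: check if any 2-of-3 triad pattern is present in article tokens."""
--     if not triad_pairs:
--         return False
--
--     # Exclude hub tokens for cleaner matching
--     toks = [t for t in article_tokens if t not in hub_tokens]
--
--     # Check all pairs of non-hub tokens against triad pairs
--     for i in range(len(toks)):
--         for j in range(i + 1, len(toks)):
--             if tuple(sorted((toks[i], toks[j]))) in triad_pairs: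
--                 return True
--     return False
-- ===== SOURCE B (Python) =====
-- def triad_seed_ok(article_tokens, hub_tokens, triad_pairs):
--     """Index-first check: iterate the triad pairs and test them against the
--     non-hub token set, instead of scanning all O(n^2) token pairs."""
--     hubs = set(hub_tokens)
--     toks = [t for t in article_tokens if t not in hubs]
--     seen = set(toks)
--     return any(
--         (a == b and toks.count(a) >= 2) or (a < b and a in seen and b in seen)
--         for (a, b) in triad_pairs
--     )
-- ===== Notes on version B (the rewrite author's own statement) =====
-- stated objective: faster
-- what changed: Instead of scanning all O(n^2) pairs of non-hub tokens against the triad list, B builds the non-hub token set (and uses a count only for equal-member pairs) once and makes a single pass over triad_pairs testing membership.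
import Mathlib
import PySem

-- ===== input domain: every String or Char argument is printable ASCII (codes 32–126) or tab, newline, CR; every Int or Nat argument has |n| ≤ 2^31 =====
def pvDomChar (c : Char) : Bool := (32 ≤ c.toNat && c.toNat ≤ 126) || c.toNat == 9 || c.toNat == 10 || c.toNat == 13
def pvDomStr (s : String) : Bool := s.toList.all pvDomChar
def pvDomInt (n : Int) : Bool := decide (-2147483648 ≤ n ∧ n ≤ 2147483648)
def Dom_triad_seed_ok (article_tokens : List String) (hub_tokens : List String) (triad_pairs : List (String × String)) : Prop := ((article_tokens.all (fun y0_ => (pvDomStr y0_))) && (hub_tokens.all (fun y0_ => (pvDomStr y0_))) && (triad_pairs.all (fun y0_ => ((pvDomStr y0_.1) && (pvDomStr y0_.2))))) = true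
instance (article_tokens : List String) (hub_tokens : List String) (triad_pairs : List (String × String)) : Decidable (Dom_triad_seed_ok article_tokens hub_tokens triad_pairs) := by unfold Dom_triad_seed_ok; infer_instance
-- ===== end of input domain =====

-- B replaces A's O(n^2) scan over all token pairs by a single pass over triad_pairs
-- against a set (and count) of the non-hub tokens (objective: faster on large articles).

-- ===== PORT A =====
-- tuple(sorted((x, y))) on a 2-tuple: exact — Python's sorted of a 2-list swaps iff y < x
def pvSorted2 (x y : String) : String × String := if y < x then (y, x) else (x, y)

-- the nested index loops 'for i … for j in range(i+1, …)' with early return,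
-- as the obvious structural recursion over the same suffixes
def pvPairScan : List String → List (String × String) → Bool
  | [], _ => false
  | x :: rest, tp => rest.any (fun y => tp.contains (pvSorted2 x y)) || pvPairScan rest tp

def triad_seed_ok (article_tokens : List String) (hub_tokens : List String) (triad_pairs : List (String × String)) : Bool :=
  if triad_pairs.isEmpty then false
  else
    let toks := article_tokens.filter (fun t => !(hub_tokens.contains t))
    pvPairScan toks triad_pairs

-- ===== PORT B =====
def triad_seed_ok_alt (article_tokens : List String) (hub_tokens : List String) (triad_pairs : List (String × String)) : Bool :=
  let hubs : PySem.Set String := PySem.Set.ofList hub_tokens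
  let toks := article_tokens.filter (fun t => !(PySem.Set.contains hubs t))
  let seen : PySem.Set String := PySem.Set.ofList toks
  triad_pairs.any (fun p =>
    (p.1 == p.2 && decide (2 ≤ PySem.List.count toks p.1)) ||
    (decide (p.1 < p.2) && PySem.Set.contains seen p.1 && PySem.Set.contains seen p.2))

-- ===== PRECONDITION & SPEC =====
def Spec_triad_seed_ok (article_tokens : List String) (hub_tokens : List String) (triad_pairs : List (String × String)) (out : Bool) : Prop := out = triad_seed_ok_alt article_tokens hub_tokens triad_pairs
instance (article_tokens : List String) (hub_tokens : List String) (triad_pairs : List (String × String)) (out : Bool) : Decidable (Spec_triad_seed_ok article_tokens hub_tokens triad_pairs out) := by unfold Spec_triad_seed_ok; infer_instance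

-- ===== CLAIM (what is proved, stated in full; the proofs are below) =====
def Claim_equal_triad_seed_ok : Prop := ∀ (article_tokens : List String) (hub_tokens : List String) (triad_pairs : List (String × String)), Dom_triad_seed_ok article_tokens hub_tokens triad_pairs → Spec_triad_seed_ok article_tokens hub_tokens triad_pairs (triad_seed_ok article_tokens hub_tokens triad_pairs)

-- ===== LEMMAS AND PROOFS =====

-- A's scan finds exactly the ordered 2-element sublists whose sorted pair is a triad pair
theorem pvPairScan_iff (toks : List String) (tp : List (String × String)) :
    pvPairScan toks tp = true ↔ ∃ x y, List.Sublist [x, y] toks ∧ pvSorted2 x y ∈ tp := by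
  induction toks with
  | nil =>
    simp [pvPairScan]
  | cons x rest ih =>
    simp only [pvPairScan, Bool.or_eq_true, List.any_eq_true, ih, List.contains_iff_mem]
    constructor
    · rintro (⟨y, hy, hm⟩ | ⟨a, b, hs, hm⟩)
      · exact ⟨x, y, (List.cons_sublist_cons).2 (List.singleton_sublist.2 hy), hm⟩
      · exact ⟨a, b, hs.cons x, hm⟩
    · rintro ⟨a, b, hs, hm⟩
      rcases List.sublist_cons_iff.1 hs with h | ⟨l, hl, hsub⟩
      · exact Or.inr ⟨a, b, h, hm⟩
      · obtain ⟨rfl, rfl⟩ : a = x ∧ l = [b] := by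
          constructor
          · exact (List.cons.injEq _ _ _ _ ▸ hl).1
          · exact (List.cons.injEq _ _ _ _ ▸ hl).2.symm
        exact Or.inl ⟨b, List.singleton_sublist.1 hsub, hm⟩

theorem pair_sublist_of_mem {a b : String} {l : List String} (hne : a ≠ b)
    (ha : a ∈ l) (hb : b ∈ l) : List.Sublist [a, b] l ∨ List.Sublist [b, a] l := by
  induction l with
  | nil => simp at ha
  | cons c t ih =>
    by_cases hca : c = a
    · subst hca
      have hbt : b ∈ t := by
        rcases List.mem_cons.1 hb with h | h
        · exact absurd h.symm hne
        · exact h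
      exact Or.inl ((List.singleton_sublist.2 hbt).cons₂ c)
    · by_cases hcb : c = b
      · subst hcb
        have hat : a ∈ t := by
          rcases List.mem_cons.1 ha with h | h
          · exact absurd h.symm hca
          · exact h
        exact Or.inr ((List.singleton_sublist.2 hat).cons₂ c)
      · have hat : a ∈ t := by
          rcases List.mem_cons.1 ha with h | h
          · exact absurd h.symm hca
          · exact h
        have hbt : b ∈ t := by
          rcases List.mem_cons.1 hb with h | h
          · exact absurd h.symm hcb
          · exact h
        rcases ih hat hbt with h | h
        · exact Or.inl (h.cons c)
        · exact Or.inr (h.cons c)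

-- the bridge: a matching ordered pair exists iff some triad pair is realised in toks
theorem exists_pair_iff (toks : List String) (tp : List (String × String)) :
    (∃ x y, List.Sublist [x, y] toks ∧ pvSorted2 x y ∈ tp) ↔
      ∃ p ∈ tp, (p.1 = p.2 ∧ 2 ≤ toks.count p.1) ∨ (p.1 < p.2 ∧ p.1 ∈ toks ∧ p.2 ∈ toks) := by
  constructor
  · rintro ⟨x, y, hs, hm⟩
    refine ⟨pvSorted2 x y, hm, ?_⟩
    by_cases hxy : x = y
    · subst hxy
      left
      have hcnt : 2 ≤ toks.count x := by
        have := hs.count_le x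
        simpa using this
      simp [pvSorted2, hcnt]
    · right
      have hxm : x ∈ toks := hs.subset (by simp)
      have hym : y ∈ toks := hs.subset (by simp)
      unfold pvSorted2
      split_ifs with h
      · exact ⟨h, hym, hxm⟩
      · exact ⟨lt_of_le_of_ne (le_of_not_gt h) hxy, hxm, hym⟩
  · rintro ⟨p, hm, ⟨heq, hcnt⟩ | ⟨hlt, h1, h2⟩⟩
    · refine ⟨p.1, p.1, ?_, ?_⟩
      · have := (List.replicate_sublist_iff ..).2 hcnt
        simpa [List.replicate] using this
      · have : pvSorted2 p.1 p.1 = p := by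
          simp [pvSorted2]
          exact (Prod.ext_iff.2 ⟨rfl, heq⟩)
        rwa [this]
    · rcases pair_sublist_of_mem (ne_of_lt hlt) h1 h2 with h | h
      · refine ⟨p.1, p.2, h, ?_⟩
        have : pvSorted2 p.1 p.2 = p := by
          simp [pvSorted2, not_lt_of_gt hlt]
        rwa [this]
      · refine ⟨p.2, p.1, h, ?_⟩
        have : pvSorted2 p.2 p.1 = p := by
          simp [pvSorted2, hlt]
        rwa [this]

theorem set_contains_ofList (l : List String) (x : String) :
    PySem.Set.contains (PySem.Set.ofList l) x = l.contains x := by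
  by_cases h : x ∈ l
  · rw [(PySem.Set.contains_iff _ _).2 ((PySem.Set.mem_ofList _ _).2 h)]
    simp [h]
  · have hc : PySem.Set.contains (PySem.Set.ofList l) x = false := by
      cases hb : PySem.Set.contains (PySem.Set.ofList l) x
      · rfl
      · exact absurd ((PySem.Set.mem_ofList _ _).1 ((PySem.Set.contains_iff _ _).1 hb)) h
    rw [hc]
    simp [h]

theorem main_eq (toks : List String) (tp : List (String × String)) :
    (if tp.isEmpty then false else pvPairScan toks tp) =
    (tp.any (fun p =>
      (p.1 == p.2 && decide (2 ≤ PySem.List.count toks p.1)) ||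
      (decide (p.1 < p.2) && PySem.Set.contains (PySem.Set.ofList toks) p.1 &&
        PySem.Set.contains (PySem.Set.ofList toks) p.2))) := by
  by_cases hemp : tp.isEmpty
  · obtain rfl := List.isEmpty_iff.1 hemp
    simp
  · rw [if_neg hemp]
    apply Bool.eq_iff_iff.2
    rw [pvPairScan_iff, exists_pair_iff]
    simp only [List.any_eq_true, Bool.or_eq_true, Bool.and_eq_true, beq_iff_eq,
      decide_eq_true_eq, PySem.Set.contains_iff, PySem.Set.mem_ofList, PySem.List.count_eq]
    constructor <;> (rintro ⟨p, hp, h⟩; exact ⟨p, hp, by tauto⟩)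

-- ===== VERDICT (by name: the statement is the Claim_ definition above) =====
theorem triad_seed_ok_spec : Claim_equal_triad_seed_ok := by
  intro article_tokens hub_tokens triad_pairs _
  unfold Spec_triad_seed_ok triad_seed_ok triad_seed_ok_alt
  show (if triad_pairs.isEmpty then false
        else pvPairScan (article_tokens.filter (fun t => !(hub_tokens.contains t))) triad_pairs) =
      (triad_pairs.any (fun p =>
        (p.1 == p.2 && decide (2 ≤ PySem.List.count
            (article_tokens.filter (fun t => !(PySem.Set.contains (PySem.Set.ofList hub_tokens) t))) p.1)) ||
        (decide (p.1 < p.2) &&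
          PySem.Set.contains (PySem.Set.ofList
            (article_tokens.filter (fun t => !(PySem.Set.contains (PySem.Set.ofList hub_tokens) t)))) p.1 &&
          PySem.Set.contains (PySem.Set.ofList
            (article_tokens.filter (fun t => !(PySem.Set.contains (PySem.Set.ofList hub_tokens) t)))) p.2)))
  have hfilter :
      article_tokens.filter (fun t => !(PySem.Set.contains (PySem.Set.ofList hub_tokens) t)) =
      article_tokens.filter (fun t => !(hub_tokens.contains t)) := by
    apply List.filter_congr
    intro t _
    rw [set_contains_ofList]
  rw [hfilter]
  exact main_eq _ _
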